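-- pv_equiv track=rewrite | github.com/kitanoyoru/Labs | AOIS/Lab3/src/fomulas/area.py | __is_extra_area
-- ===== SOURCE A (Python) =====
-- def __is_extra_area(original_area, areas):
--     is_in_count = 0
--     for const in original_area:
--         for area in areas:
--             if const in area and area != original_area:
--                 is_in_count += 1
--                 break
--
--     return is_in_count != len(original_area)
-- ===== SOURCE B (Python) =====
-- def __is_extra_area(original_area, areas):
--     seen = set()
--     for area in areas:
--         if area != original_area:
--             seen.update(area)
--     return not set(original_area) <= seen
-- ===== Notes on version B (the rewrite author's own statement) =====
-- stated objective: faster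
-- what changed: Replaces the per-constant scan over all areas with a counter by a single pass building a set of constants from the other areas followed by one subset test.
import Mathlib
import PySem

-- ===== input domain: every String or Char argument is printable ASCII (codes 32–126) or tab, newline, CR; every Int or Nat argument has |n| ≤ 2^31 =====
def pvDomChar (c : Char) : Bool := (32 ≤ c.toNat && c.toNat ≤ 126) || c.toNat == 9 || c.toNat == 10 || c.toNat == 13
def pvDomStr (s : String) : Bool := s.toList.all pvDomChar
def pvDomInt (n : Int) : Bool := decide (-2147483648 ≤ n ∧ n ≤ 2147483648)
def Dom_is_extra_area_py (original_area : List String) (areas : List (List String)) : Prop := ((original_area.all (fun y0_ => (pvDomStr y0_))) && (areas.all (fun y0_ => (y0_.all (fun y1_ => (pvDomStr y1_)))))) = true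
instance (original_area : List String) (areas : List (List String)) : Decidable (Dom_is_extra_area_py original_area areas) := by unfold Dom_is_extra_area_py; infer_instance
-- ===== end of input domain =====

-- B builds the set of constants of the other areas in one pass and does a single subset test instead of A's per-constant scan-and-count loop (simpler).
-- ===== PORT A =====
-- inner 'for area in areas: ... break' loop of A: true iff the break fires
def pvInnerA (const : String) (original_area : List String) : List (List String) → Bool
  | [] => false
  | area :: rest =>
      if area.contains const && area != original_area then true
      else pvInnerA const original_area rest

def is_extra_area_py (original_area : List String) (areas : List (List String)) : Bool :=
  let is_in_count : Int :=
    original_area.foldl (fun c const => if pvInnerA const original_area areas then c + 1 else c) 0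
  is_in_count != (original_area.length : Int)

-- ===== PORT B =====
def is_extra_area_py_alt (original_area : List String) (areas : List (List String)) : Bool :=
  let seen : PySem.Set String :=
    areas.foldl (fun s area => if area != original_area then PySem.Set.update s area else s)
      PySem.Set.empty
  !(PySem.Set.issubset (PySem.Set.ofList original_area) seen)

-- ===== PRECONDITION & SPEC =====
def Spec_is_extra_area_py (original_area : List String) (areas : List (List String)) (out : Bool) : Prop := out = is_extra_area_py_alt original_area areas
instance (original_area : List String) (areas : List (List String)) (out : Bool) : Decidable (Spec_is_extra_area_py original_area areas out) := by unfold Spec_is_extra_area_py; infer_instance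

-- ===== CLAIM (what is proved, stated in full; the proofs are below) =====
def Claim_equal_is_extra_area_py : Prop := ∀ (original_area : List String) (areas : List (List String)), Dom_is_extra_area_py original_area areas → Spec_is_extra_area_py original_area areas (is_extra_area_py original_area areas)

-- ===== LEMMAS AND PROOFS =====

lemma pvInnerA_iff (const : String) (oa : List String) (areas : List (List String)) :
    pvInnerA const oa areas = true ↔ ∃ area ∈ areas, const ∈ area ∧ area ≠ oa := by
  induction areas with
  | nil => simp [pvInnerA]
  | cons a rest ih =>
      simp only [pvInnerA]
      split_ifs with h
      · simp only [Bool.and_eq_true, bne_iff_ne, List.contains_iff_mem] at h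
        simp [h.1, h.2]
      · simp only [Bool.and_eq_true, bne_iff_ne, List.contains_iff_mem, not_and_or] at h
        simp only [ih, List.mem_cons]
        constructor
        · rintro ⟨area, hm, hc⟩; exact ⟨area, Or.inr hm, hc⟩
        · rintro ⟨area, hm, hc⟩
          rcases hm with rfl | hm
          · rcases h with h | h
            · exact absurd hc.1 h
            · exact absurd hc.2 (by simpa using h)
          · exact ⟨area, hm, hc⟩

lemma pvSeen_mem (oa : List String) (areas : List (List String)) (s : PySem.Set String)
    (c : String) :
    c ∈ areas.foldl (fun s area => if area != oa then PySem.Set.update s area else s) s ↔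
      c ∈ s ∨ ∃ area ∈ areas, area ≠ oa ∧ c ∈ area := by
  induction areas generalizing s with
  | nil => simp
  | cons a rest ih =>
      simp only [List.foldl_cons]
      split_ifs with h
      · simp only [ih, PySem.Set.mem_update, List.mem_cons]
        constructor
        · rintro (⟨hs | ha⟩ | ⟨area, hm, hc⟩)
          · exact Or.inl hs
          · exact Or.inr ⟨a, Or.inl rfl, by simpa using h, ha⟩
          · exact Or.inr ⟨area, Or.inr hm, hc⟩
        · rintro (hs | ⟨area, hm, hne, hc⟩)
          · exact Or.inl (Or.inl hs)
          · rcases hm with rfl | hm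
            · exact Or.inl (Or.inr hc)
            · exact Or.inr ⟨area, hm, hne, hc⟩
      · simp only [bne_iff_ne, not_not] at h
        subst h
        simp only [ih, List.mem_cons]
        constructor
        · rintro (hs | ⟨area, hm, hc⟩)
          · exact Or.inl hs
          · exact Or.inr ⟨area, Or.inr hm, hc⟩
        · rintro (hs | ⟨area, hm, hne, hc⟩)
          · exact Or.inl hs
          · rcases hm with rfl | hm
            · exact absurd rfl hne
            · exact Or.inr ⟨area, hm, hne, hc⟩

lemma pvCount_eq (p : String → Bool) (oa : List String) (n : Int) :
    oa.foldl (fun c const => if p const then c + 1 else c) n = n + (oa.countP p : Int) := by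
  induction oa generalizing n with
  | nil => simp
  | cons a rest ih =>
      simp only [List.foldl_cons, List.countP_cons]
      split_ifs with h <;> rw [ih] <;> push_cast <;> ring

-- ===== VERDICT (by name: the statement is the Claim_ definition above) =====
theorem is_extra_area_py_spec : Claim_equal_is_extra_area_py := by
  intro oa areas _
  unfold Spec_is_extra_area_py is_extra_area_py is_extra_area_py_alt
  simp only [pvCount_eq, zero_add]
  have key : oa.countP (fun const => pvInnerA const oa areas) = oa.length ↔
      (PySem.Set.ofList oa).issubset
        (areas.foldl (fun s area => if area != oa then PySem.Set.update s area else s)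
          PySem.Set.empty) = true := by
    rw [PySem.Set.issubset_iff, List.countP_eq_length]
    constructor
    · intro h c hc
      rw [PySem.Set.mem_ofList] at hc
      have := h c hc
      rw [pvInnerA_iff] at this
      rw [pvSeen_mem]
      rcases this with ⟨area, hm, hin, hne⟩
      exact Or.inr ⟨area, hm, hne, hin⟩
    · intro h c hc
      have := h c (by rw [PySem.Set.mem_ofList]; exact hc)
      rw [pvSeen_mem] at this
      rw [pvInnerA_iff]
      rcases this with hs | ⟨area, hm, hne, hin⟩
      · simp [PySem.Set.empty] at hs
      · exact ⟨area, hm, hin, hne⟩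
  rw [Bool.eq_iff_iff, bne_iff_ne, ne_eq, Nat.cast_inj, key, Bool.not_eq_true']
  exact (Bool.not_eq_true _).to_iff
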